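-- pv_equiv track=rewrite | github.com/matheussampaio/problems-solving | interviews/wizeline/r_2_q_1.py | solution
-- ===== SOURCE A (Python) =====
-- def solution(votes):
--     candidatos = {}
--
--     mais_votado = votes[0]
--     votos = 1
--
--     for v in votes:
--         if v not in candidatos:
--             candidatos[v] = 1
--         else:
--             candidatos[v] += 1
--
--         if candidatos[v] > votos:
--             votos = candidatos[v]
--             mais_votado = v
--         elif candidatos[v] == votos and v > mais_votado:
--             mais_votado = v
--
--     return mais_votado
-- ===== SOURCE B (Python) =====
-- def solution(votes):
--     counts = {}
--     for v in votes:
--         counts[v] = counts.get(v, 0) + 1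
--     return max(counts, key=lambda v: (counts[v], v))
-- ===== Notes on version B (the rewrite author's own statement) =====
-- stated objective: simpler
-- what changed: Replaces A's interleaved running-leader loop (tally, running max and tie-break updated together per vote) with a count-then-select decomposition: build the full tally in one pass, then pick max(counts, key=lambda v: (counts[v], v)).
import Mathlib
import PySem

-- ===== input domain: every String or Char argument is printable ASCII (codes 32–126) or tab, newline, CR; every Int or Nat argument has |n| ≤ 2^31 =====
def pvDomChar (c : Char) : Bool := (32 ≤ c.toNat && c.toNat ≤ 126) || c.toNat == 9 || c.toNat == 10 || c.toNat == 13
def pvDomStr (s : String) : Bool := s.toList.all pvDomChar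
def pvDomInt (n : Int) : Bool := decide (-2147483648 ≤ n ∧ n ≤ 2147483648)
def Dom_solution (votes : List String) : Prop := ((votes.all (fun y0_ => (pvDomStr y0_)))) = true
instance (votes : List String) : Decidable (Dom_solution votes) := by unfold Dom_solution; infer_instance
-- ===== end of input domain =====

-- B replaces A's interleaved running-leader loop with a count-then-select decomposition
-- (tally everything first, then take the max by (count, candidate)); objective: simpler.

-- ===== PORT A =====
-- one iteration of A's for-loop: update the tally, then the running leader
def solutionStep (st : PySem.Dict String Int × String × Int) (v : String) :
    PySem.Dict String Int × String × Int :=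
  let cand := if st.1.contains v = false then st.1.insert v 1
              else st.1.insert v (st.1.getD v 0 + 1)
  let cv := cand.getD v 0
  if cv > st.2.2 then (cand, v, cv)
  else if cv = st.2.2 ∧ st.2.1 < v then (cand, v, st.2.2)
  else (cand, st.2.1, st.2.2)

def solution (votes : List String) : String :=
  -- votes[0]: IndexError on [] is excluded by Pre_solution
  let mv0 := votes.headD ""
  (votes.foldl solutionStep ((PySem.Dict.empty : PySem.Dict String Int), mv0, 1)).2.1

-- ===== PORT B =====
def solution_alt (votes : List String) : String :=
  let counts := votes.foldl (fun d v => d.insert v (d.getD v 0 + 1))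
      (PySem.Dict.empty : PySem.Dict String Int)
  -- max(counts, key=lambda v: (counts[v], v)); ValueError on [] is excluded by Pre_solution
  match PySem.List.max2? counts.keys (fun v => counts.getD v 0) (fun v => v) with
  | some m => m
  | none => ""

-- ===== PRECONDITION & SPEC =====
-- Pre_ excludes only the empty list, on which A raises IndexError (and B raises ValueError).
def Pre_solution (votes : List String) : Prop := votes ≠ []
instance (votes : List String) : Decidable (Pre_solution votes) := by unfold Pre_solution; infer_instance
def pvWitness_solution : List String := (["a", "b", "b"])

def Spec_solution (votes : List String) (out : String) : Prop := out = solution_alt votes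
instance (votes : List String) (out : String) : Decidable (Spec_solution votes out) := by unfold Spec_solution; infer_instance

-- ===== CLAIM (what is proved, stated in full; the proofs are below) =====
def Claim_equal_solution : Prop := ∀ (votes : List String), Dom_solution votes → Pre_solution votes → Spec_solution votes (solution votes)

-- ===== LEMMAS AND PROOFS =====

-- the winner characterisation both programs compute: maximal count, ties broken by the larger string
def IsBest (votes : List String) (m : String) : Prop :=
  m ∈ votes ∧ ∀ y ∈ votes,
    (votes.count y : Int) < (votes.count m : Int) ∨
    ((votes.count y : Int) = (votes.count m : Int) ∧ y ≤ m)

lemma isBest_unique {votes : List String} {a b : String}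
    (ha : IsBest votes a) (hb : IsBest votes b) : a = b := by
  rcases ha with ⟨hma, hfa⟩
  rcases hb with ⟨hmb, hfb⟩
  rcases hfa b hmb with h1 | ⟨h1, h1'⟩ <;> rcases hfb a hma with h2 | ⟨h2, h2'⟩ <;>
    first
    | omega
    | exact le_antisymm h2' h1'

-- invariant of A's loop after the (nonempty) prefix p has been processed
def InvA (p : List String) (mv : String) (vo : Int) : Prop :=
  mv ∈ p ∧ (p.count mv : Int) = vo ∧ ∀ y ∈ p,
    (p.count y : Int) < vo ∨ ((p.count y : Int) = vo ∧ y ≤ mv)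

lemma counter_snoc {κ : Type} [BEq κ] [LawfulBEq κ] (p : List κ) (v : κ) :
    PySem.Dict.counter (p ++ [v]) =
      (PySem.Dict.counter p).insert v ((PySem.Dict.counter p).getD v 0 + 1) := by
  rw [← PySem.Dict.foldl_insert_getD_add_one_eq_counter,
      ← PySem.Dict.foldl_insert_getD_add_one_eq_counter, List.foldl_append]
  rfl

lemma solutionStep_counter (p : List String) (mv : String) (vo : Int) (v : String) :
    solutionStep (PySem.Dict.counter p, mv, vo) v =
      let cand := PySem.Dict.counter (p ++ [v])
      let cv : Int := ((p.count v : Int) + 1)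
      if cv > vo then (cand, v, cv)
      else if cv = vo ∧ mv < v then (cand, v, vo)
      else (cand, mv, vo) := by
  have hcand : (if (PySem.Dict.counter p).contains v = false
        then (PySem.Dict.counter p).insert v 1
        else (PySem.Dict.counter p).insert v ((PySem.Dict.counter p).getD v 0 + 1)) =
      PySem.Dict.counter (p ++ [v]) := by
    rw [counter_snoc]
    by_cases h : v ∈ p
    · have hc : p.contains v = true := by simpa using h
      rw [PySem.Dict.contains_counter, hc]; simp
    · have hc : p.contains v = false := by simpa using h
      have hcz : p.count v = 0 := List.count_eq_zero.mpr h
      rw [PySem.Dict.contains_counter, hc]; simp [PySem.Dict.getD_counter, hcz]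
  have hcv : (PySem.Dict.counter (p ++ [v])).getD v 0 = (p.count v : Int) + 1 := by
    rw [PySem.Dict.getD_counter]
    simp
  simp only [solutionStep, hcand, hcv]

lemma A_inv : ∀ (l p : List String) (mv : String) (vo : Int), InvA p mv vo →
    ∃ mv' vo', l.foldl solutionStep (PySem.Dict.counter p, mv, vo) =
        (PySem.Dict.counter (p ++ l), mv', vo') ∧ InvA (p ++ l) mv' vo' := by
  intro l
  induction l with
  | nil => intro p mv vo h; exact ⟨mv, vo, by simp, by simpa using h⟩
  | cons v l' ih =>
    intro p mv vo h
    rcases h with ⟨hmem, hcnt, hmax⟩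
    have hle : (p.count v : Int) ≤ vo := by
      by_cases hv : v ∈ p
      · rcases hmax v hv with h1 | ⟨h1, _⟩ <;> omega
      · have : p.count v = 0 := List.count_eq_zero.mpr hv
        omega
    -- counts in p ++ [v]
    have hcv : ∀ y, ((p ++ [v]).count y : Int) =
        (p.count y : Int) + (if y = v then 1 else 0) := by
      intro y
      rw [List.count_append]
      by_cases hy : y = v
      · subst hy; simp
      · have hvy : v ≠ y := fun hh => hy hh.symm
        simp [hy, hvy]
    rw [List.foldl_cons, solutionStep_counter]
    simp only []
    by_cases h1 : (p.count v : Int) + 1 > vo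
    · -- new strict leader v
      rw [if_pos h1]
      have hinv : InvA (p ++ [v]) v ((p.count v : Int) + 1) := by
        refine ⟨by simp, by rw [hcv v]; simp, ?_⟩
        intro y hy
        rw [hcv y]
        by_cases hyv : y = v
        · subst hyv; right; simp
        · left
          have hyp : y ∈ p := by
            rcases List.mem_append.mp hy with h | h
            · exact h
            · simp at h; exact absurd h hyv
          rw [if_neg hyv]
          rcases hmax y hyp with h2 | ⟨h2, _⟩ <;> omega
      rcases ih (p ++ [v]) v ((p.count v : Int) + 1) hinv with ⟨mv', vo', heq, hinv'⟩
      exact ⟨mv', vo', by rw [heq]; simp, by simpa using hinv'⟩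
    · rw [if_neg h1]
      by_cases h2 : (p.count v : Int) + 1 = vo ∧ mv < v
      · -- tie with a larger candidate string: leader becomes v
        rw [if_pos h2]
        rcases h2 with ⟨h2, h2'⟩
        have hinv : InvA (p ++ [v]) v vo := by
          refine ⟨by simp, by rw [hcv v]; simp; omega, ?_⟩
          intro y hy
          rw [hcv y]
          by_cases hyv : y = v
          · subst hyv; rw [if_pos rfl]; right; exact ⟨by omega, le_refl _⟩
          · have hyp : y ∈ p := by
              rcases List.mem_append.mp hy with h | h
              · exact h
              · simp at h; exact absurd h hyv
            rw [if_neg hyv]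
            rcases hmax y hyp with h3 | ⟨h3, h3'⟩
            · left; omega
            · right; exact ⟨by omega, le_trans h3' (le_of_lt h2')⟩
        rcases ih (p ++ [v]) v vo hinv with ⟨mv', vo', heq, hinv'⟩
        exact ⟨mv', vo', by rw [heq]; simp, by simpa using hinv'⟩
      · -- leader unchanged
        rw [if_neg h2]
        have hmvv : mv ≠ v := by
          intro heq
          subst heq
          omega
        have hinv : InvA (p ++ [v]) mv vo := by
          refine ⟨List.mem_append.mpr (Or.inl hmem), by rw [hcv mv]; rw [if_neg hmvv]; omega, ?_⟩
          intro y hy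
          rw [hcv y]
          by_cases hyv : y = v
          · subst hyv
            rw [if_pos rfl]
            by_cases h3 : (p.count y : Int) + 1 = vo
            · right
              refine ⟨h3, ?_⟩
              have : ¬ mv < y := fun hlt => h2 ⟨h3, hlt⟩
              exact not_lt.mp this
            · left; omega
          · have hyp : y ∈ p := by
              rcases List.mem_append.mp hy with h | h
              · exact h
              · simp at h; exact absurd h hyv
            rw [if_neg hyv]
            rcases hmax y hyp with h3 | ⟨h3, h3'⟩
            · left; omega
            · right; exact ⟨by omega, h3'⟩
        rcases ih (p ++ [v]) mv vo hinv with ⟨mv', vo', heq, hinv'⟩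
        exact ⟨mv', vo', by rw [heq]; simp, by simpa using hinv'⟩

-- A's result is the best candidate
lemma A_isBest (v0 : String) (t : List String) : IsBest (v0 :: t) (solution (v0 :: t)) := by
  have hfirst : solutionStep ((PySem.Dict.empty : PySem.Dict String Int), v0, 1) v0 =
      (PySem.Dict.counter [v0], v0, 1) := by
    have h1 : PySem.Dict.counter [v0] =
        (PySem.Dict.empty : PySem.Dict String Int).insert v0 1 := by
      have := counter_snoc ([] : List String) v0
      simpa [PySem.Dict.getD_counter] using this
    have hcv : ((PySem.Dict.empty : PySem.Dict String Int).insert v0 1).getD v0 0 = 1 := by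
      rw [← h1, PySem.Dict.getD_counter]; simp
    simp [solutionStep, hcv, h1, PySem.Dict.contains_empty]
  have hinv0 : InvA [v0] v0 1 := by
    refine ⟨by simp, by simp, ?_⟩
    intro y hy
    simp at hy
    subst hy
    right
    simp
  rcases A_inv t [v0] v0 1 hinv0 with ⟨mv', vo', heq, hinv'⟩
  have : solution (v0 :: t) = mv' := by
    simp only [solution, List.headD_cons, List.foldl_cons, hfirst, heq]
  rw [this]
  rcases hinv' with ⟨hmem, hcnt, hmax⟩
  refine ⟨by simpa using hmem, ?_⟩
  intro y hy
  have h := hmax y (by simpa using hy)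
  simp only [List.singleton_append] at h hcnt
  rcases h with h | ⟨h, h'⟩
  · left; omega
  · right; exact ⟨by omega, h'⟩

-- B's fold step: the max2? accumulator step with keys (k1, identity), named for rewriting
def bstep (k1 : String → Int) (acc : Option String) (x : String) : Option String :=
  match acc with
  | none => some x
  | some m => if (decide (k1 m < k1 x) || !decide (k1 x < k1 m) && decide (m < x)) = true
              then some x else some m

-- the lexicographic (count, candidate) order both programs maximise
def lexle (k1 : String → Int) (a b : String) : Prop :=
  k1 a < k1 b ∨ (k1 a = k1 b ∧ a ≤ b)

lemma lexle_trans {k1 : String → Int} {a b c : String}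
    (h1 : lexle k1 a b) (h2 : lexle k1 b c) : lexle k1 a c := by
  rcases h1 with h1 | ⟨h1, h1'⟩ <;> rcases h2 with h2 | ⟨h2, h2'⟩
  · exact Or.inl (by omega)
  · exact Or.inl (by omega)
  · exact Or.inl (by omega)
  · exact Or.inr ⟨by omega, le_trans h1' h2'⟩

lemma max2_fold_spec (k1 : String → Int) :
    ∀ (t : List String) (m : String),
    ∃ r, t.foldl (bstep k1) (some m) = some r ∧
      (r = m ∨ r ∈ t) ∧ lexle k1 m r ∧ ∀ y ∈ t, lexle k1 y r := by
  intro t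
  induction t with
  | nil =>
    intro m
    exact ⟨m, rfl, Or.inl rfl, Or.inr ⟨rfl, le_refl m⟩, by simp⟩
  | cons x t' ih =>
    intro m
    rw [List.foldl_cons]
    by_cases hc : (decide (k1 m < k1 x) || !decide (k1 x < k1 m) && decide (m < x)) = true
    · have hs : bstep k1 (some m) x = some x := by rw [bstep, if_pos hc]
      rw [hs]
      rcases ih x with ⟨r, heq, hmem, hlex, hall⟩
      have hmx : lexle k1 m x := by
        simp only [Bool.or_eq_true, Bool.and_eq_true, decide_eq_true_eq,
          Bool.not_eq_true', decide_eq_false_iff_not] at hc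
        rcases hc with hc | ⟨hc1, hc2⟩
        · exact Or.inl hc
        · by_cases h : k1 m < k1 x
          · exact Or.inl h
          · exact Or.inr ⟨by omega, le_of_lt hc2⟩
      refine ⟨r, heq, ?_, lexle_trans hmx hlex, ?_⟩
      · rcases hmem with h | h
        · exact Or.inr (h ▸ List.mem_cons_self)
        · exact Or.inr (List.mem_cons_of_mem _ h)
      · intro y hy
        rcases List.mem_cons.mp hy with h | h
        · exact h ▸ hlex
        · exact hall y h
    · have hs : bstep k1 (some m) x = some m := by rw [bstep, if_neg hc]
      rw [hs]
      rcases ih m with ⟨r, heq, hmem, hlex, hall⟩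
      have hxm : lexle k1 x m := by
        simp only [Bool.or_eq_true, Bool.and_eq_true, decide_eq_true_eq,
          Bool.not_eq_true', decide_eq_false_iff_not, not_or, not_and] at hc
        rcases hc with ⟨hc1, hc2⟩
        by_cases h : k1 x < k1 m
        · exact Or.inl h
        · exact Or.inr ⟨by omega, not_lt.mp (hc2 h)⟩
      refine ⟨r, heq, ?_, hlex, ?_⟩
      · rcases hmem with h | h
        · exact Or.inl h
        · exact Or.inr (List.mem_cons_of_mem _ h)
      · intro y hy
        rcases List.mem_cons.mp hy with h | h
        · exact h ▸ lexle_trans hxm hlex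
        · exact hall y h

-- B's result is the best candidate
lemma B_isBest (v0 : String) (t : List String) : IsBest (v0 :: t) (solution_alt (v0 :: t)) := by
  have hcounts : (v0 :: t).foldl (fun d v => d.insert v (d.getD v 0 + 1))
      (PySem.Dict.empty : PySem.Dict String Int) = PySem.Dict.counter (v0 :: t) :=
    PySem.Dict.foldl_insert_getD_add_one_eq_counter _
  have hkeys : (PySem.Dict.counter (v0 :: t)).keys = PySem.Set.ofList (v0 :: t) :=
    PySem.Dict.keys_counter _
  have hne : PySem.Set.ofList (v0 :: t) ≠ [] := by
    intro h
    have : v0 ∈ PySem.Set.ofList (v0 :: t) := (PySem.Set.mem_ofList _ _).mpr (by simp)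
    rw [h] at this
    exact absurd this (List.not_mem_nil)
  obtain ⟨k, ks, hk⟩ := List.exists_cons_of_ne_nil hne
  set k1 : String → Int := fun y => (PySem.Dict.counter (v0 :: t)).getD y 0 with hk1
  have hmax2 : PySem.List.max2? (k :: ks) k1 (fun v => v) = ks.foldl (bstep k1) (some k) := by
    unfold PySem.List.max2?
    rw [List.foldl_cons]
    congr 1
    · funext acc x
      cases acc <;> rfl
  rcases max2_fold_spec k1 ks k with ⟨r, heq, hmem, hlex, hall⟩
  have halt : solution_alt (v0 :: t) = r := by
    rw [solution_alt]
    simp only [hcounts, hkeys, hk, ← hk1, hmax2, heq]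
  rw [halt]
  have hk1c : ∀ y, k1 y = ((v0 :: t).count y : Int) := by
    intro y
    rw [hk1]
    exact PySem.Dict.getD_counter _ _
  have hsetmem : ∀ y, y ∈ (v0 :: t) ↔ y ∈ k :: ks := by
    intro y
    rw [← hk]
    exact (PySem.Set.mem_ofList _ _).symm
  constructor
  · rcases hmem with h | h
    · exact (hsetmem r).mpr (h ▸ List.mem_cons_self)
    · exact (hsetmem r).mpr (List.mem_cons_of_mem _ h)
  · intro y hy
    have hlexyr : lexle k1 y r := by
      rcases List.mem_cons.mp ((hsetmem y).mp hy) with h | h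
      · exact h ▸ hlex
      · exact hall y h
    rcases hlexyr with h | ⟨h, h'⟩
    · left; rw [← hk1c y, ← hk1c r]; exact h
    · right; exact ⟨by rw [← hk1c y, ← hk1c r]; exact h, h'⟩

-- ===== VERDICT (by name: the statement is the Claim_ definition above) =====
theorem solution_spec : Claim_equal_solution := by
  intro votes _hdom hpre
  unfold Spec_solution
  obtain ⟨v0, t, rfl⟩ := List.exists_cons_of_ne_nil hpre
  exact isBest_unique (A_isBest v0 t) (B_isBest v0 t)
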